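-- pv_equiv track=rewrite | github.com/YoavCarmel/project_euler | problems/P120.py | fa
-- ===== SOURCE A (Python) =====
-- def fa(a):
--     """
--     for even n always returns 2, so init with it and go only over odd n values
--     for odd n, the calculation equals (2*n*a)%(a**2)
--     :param a: the a to calculate to
--     """
--     m = 2
--     ap2 = a ** 2
--     at2 = a * 2
--     s = 0
--     for n in range(1, 2 * a + 1, 2):
--         s = (s + at2) % ap2
--         m = max(m, s)
--     return m
-- ===== SOURCE B (Python) =====
-- def fa(a):
--     # Closed form: the running values are a*(2k mod a) for k=1..a, whose maximum
--     # is a*(a-1) for odd a and a*(a-2) for even a; the result is floored at 2.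
--     if a <= 2:
--         return 2
--     return a * (a - 1) if a % 2 else a * (a - 2)
-- ===== Notes on version B (the rewrite author's own statement) =====
-- stated objective: faster
-- what changed: Replaces A's O(a) loop maximising the running value (2na mod a^2) over odd n by the closed form a*(a-1) for odd a and a*(a-2) for even a, floored at 2.
import Mathlib
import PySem

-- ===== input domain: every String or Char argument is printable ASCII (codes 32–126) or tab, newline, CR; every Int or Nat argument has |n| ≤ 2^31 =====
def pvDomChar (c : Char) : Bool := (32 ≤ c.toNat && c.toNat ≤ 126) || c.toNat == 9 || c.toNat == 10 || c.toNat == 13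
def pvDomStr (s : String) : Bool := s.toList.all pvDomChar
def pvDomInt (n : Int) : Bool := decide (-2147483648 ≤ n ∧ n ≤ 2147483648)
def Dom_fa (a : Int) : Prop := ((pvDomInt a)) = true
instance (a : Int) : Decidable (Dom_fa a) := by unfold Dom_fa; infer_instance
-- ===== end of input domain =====

-- B replaces A's O(a) loop over odd n by the closed form max(2, a*(a-1)) for odd a
-- and max(2, a*(a-2)) for even a (objective: faster, O(1)).

-- ===== PORT A =====
def fa (a : Int) : Int :=
  let ap2 : Int := a ^ 2
  let at2 : Int := a * 2
  let r := (PySem.List.pyRange 1 (2 * a + 1) 2).foldl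
      (fun (ms : Int × Int) _ =>
        let s := PySem.Int.mod (ms.2 + at2) ap2
        (max ms.1 s, s)) (2, 0)
  r.1

-- ===== PORT B =====
def fa_alt (a : Int) : Int :=
  if a ≤ 2 then 2
  else if PySem.Int.mod a 2 ≠ 0 then a * (a - 1)
  else a * (a - 2)

-- ===== PRECONDITION & SPEC =====
def Spec_fa (a : Int) (out : Int) : Prop := out = fa_alt a
instance (a : Int) (out : Int) : Decidable (Spec_fa a out) := by unfold Spec_fa; infer_instance

-- ===== CLAIM (what is proved, stated in full; the proofs are below) =====
def Claim_equal_fa : Prop := ∀ (a : Int), Dom_fa a → Spec_fa a (fa a)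

-- ===== LEMMAS AND PROOFS =====

/-- The loop body of A, with the modulus rewritten to `%` (valid since `0 < a^2`
    whenever the loop runs). -/
def gstep (a : Int) (ms : Int × Int) : Int × Int :=
  ((max ms.1 ((ms.2 + a * 2) % a ^ 2)), (ms.2 + a * 2) % a ^ 2)

lemma foldl_ignore {α β : Type} (f : β → β) :
    ∀ (l : List α) (init : β), List.foldl (fun st _ => f st) init l = f^[l.length] init
  | [], _ => rfl
  | _ :: xs, init => by
      simp [foldl_ignore f xs, Function.iterate_succ_apply]

lemma fa_eq_iter (a : Int) (ha : 1 ≤ a) :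
    fa a = ((gstep a)^[a.toNat] (2, 0)).1 := by
  have hpos : (0 : Int) < a ^ 2 := by positivity
  rw [show fa a = ((PySem.List.pyRange 1 (2 * a + 1) 2).foldl
      (fun (ms : Int × Int) _ =>
        (max ms.1 (PySem.Int.mod (ms.2 + a * 2) (a ^ 2)),
          PySem.Int.mod (ms.2 + a * 2) (a ^ 2))) (2, 0)).1 from rfl]
  rw [PySem.List.pyRange_of_pos 1 (2 * a + 1) (by norm_num)]
  rw [List.foldl_map]
  have hfun : (fun (ms : Int × Int) (_ : Nat) =>
      (max ms.1 (PySem.Int.mod (ms.2 + a * 2) (a ^ 2)),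
        PySem.Int.mod (ms.2 + a * 2) (a ^ 2))) = (fun ms _ => gstep a ms) := by
    funext ms x
    simp [gstep, PySem.Int.mod_eq_emod_of_pos hpos]
  simp only [hfun]
  rw [foldl_ignore (gstep a)]
  have hn : (if (1 : Int) < 2 * a + 1 then ((2 * a + 1 - 1 + 2 - 1) / 2).toNat else 0)
      = a.toNat := by
    rw [if_pos (by omega)]; omega
  rw [List.length_range, hn]

/-- Any value the loop's `s` can take is at most `a*2*((a-1)/2)`
    (= a(a-1) for odd a, a(a-2) for even a). -/
lemma s_bound (a : Int) (ha : 3 ≤ a) (j : Int) :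
    (a * 2 * j) % a ^ 2 ≤ a * 2 * ((a - 1) / 2) := by
  have hpos : (0 : Int) < a ^ 2 := by positivity
  have hs0 : 0 ≤ (a * 2 * j) % a ^ 2 := Int.emod_nonneg _ (by positivity)
  have hslt : (a * 2 * j) % a ^ 2 < a ^ 2 := Int.emod_lt_of_pos _ hpos
  rcases Int.even_or_odd a with ⟨b, hb⟩ | ⟨b, hb⟩
  · -- a even, a = b + b : the residue is a multiple of 2a
    have h2 : a * 2 ∣ a ^ 2 := ⟨b, by rw [hb]; ring⟩
    have h0 : (a * 2 * j) % a ^ 2 % (a * 2) = 0 := by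
      rw [Int.emod_emod_of_dvd _ h2, Int.mul_emod_right]
    obtain ⟨t, ht⟩ := Int.dvd_of_emod_eq_zero h0
    have hB : (a - 1) / 2 = b - 1 := by omega
    rw [ht, hB]
    have h2a : (0 : Int) < a * 2 := by omega
    have htb : t < b := by
      have : a * 2 * t < a * 2 * b := by
        rw [← ht]
        calc a * 2 * j % a ^ 2 < a ^ 2 := hslt
          _ = a * 2 * b := by rw [hb]; ring
      exact lt_of_mul_lt_mul_left this (by omega)
    exact mul_le_mul_of_nonneg_left (by omega) (by omega)
  · -- a odd, a = 2b + 1 : the residue is a multiple of a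
    have h2 : a ∣ a ^ 2 := ⟨a, by ring⟩
    have h0 : (a * 2 * j) % a ^ 2 % a = 0 := by
      rw [Int.emod_emod_of_dvd _ h2]
      exact Int.emod_eq_zero_of_dvd ⟨2 * j, by ring⟩
    obtain ⟨t, ht⟩ := Int.dvd_of_emod_eq_zero h0
    have hB : 2 * ((a - 1) / 2) = a - 1 := by omega
    have hta : t ≤ a - 1 := by
      have : a * t < a * a := by
        rw [← ht]
        calc a * 2 * j % a ^ 2 < a ^ 2 := hslt
          _ = a * a := by ring
      have := lt_of_mul_lt_mul_left this (by omega : (0:Int) ≤ a)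
      omega
    calc a * 2 * j % a ^ 2 = a * t := ht
      _ ≤ a * (a - 1) := mul_le_mul_of_nonneg_left hta (by omega)
      _ = a * 2 * ((a - 1) / 2) := by linear_combination a * hB.symm

/-- Phase 1: while `2aj` has not wrapped, the state is `(2aj, 2aj)`. -/
lemma phase1 (a : Int) (ha : 3 ≤ a) :
    ∀ j : Nat, 1 ≤ j → (j : Int) ≤ (a - 1) / 2 →
      (gstep a)^[j] (2, 0) = (a * 2 * j, a * 2 * j) := by
  intro j
  induction j with
  | zero => omega
  | succ j ih =>
    intro _ hle
    rcases Nat.eq_zero_or_pos j with hj0 | hj1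
    · subst hj0
      have hlt : a * 2 < a ^ 2 := by nlinarith
      simp [gstep, Int.emod_eq_of_lt (by omega) hlt]
      omega
    · have hle' : (j : Int) ≤ (a - 1) / 2 := by push_cast at hle ⊢; omega
      rw [Function.iterate_succ_apply', ih hj1 hle']
      have hb : 2 * ((j : Int) + 1) ≤ a - 1 := by omega
      have hlt : a * 2 * ((j : Int) + 1) < a ^ 2 := by nlinarith
      have h0 : 0 ≤ a * 2 * ((j : Int) + 1) := by positivity
      have heq : a * 2 * (j : Int) + a * 2 = a * 2 * ((j : Int) + 1) := by ring
      simp only [gstep, heq, Int.emod_eq_of_lt h0 hlt]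
      have hmax : max (a * 2 * (j : Int)) (a * 2 * ((j : Int) + 1)) =
          a * 2 * ((j : Int) + 1) := by
        apply max_eq_right; nlinarith
      rw [hmax]
      push_cast
      ring_nf

/-- Phase 2: once the maximum `a*2*((a-1)/2)` is reached, `m` stays there. -/
lemma phase2 (a : Int) (ha : 3 ≤ a) :
    ∀ j : Nat, (a - 1) / 2 ≤ (j : Int) →
      ((gstep a)^[j] (2, 0)).1 = a * 2 * ((a - 1) / 2) ∧
      ((gstep a)^[j] (2, 0)).2 = (a * 2 * (j : Int)) % a ^ 2 := by
  intro j
  induction j with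
  | zero => intro h; exfalso; omega
  | succ j ih =>
    intro hle
    rcases lt_or_ge (j : Int) ((a - 1) / 2) with hlt | hge
    · -- j + 1 = (a-1)/2 exactly: phase 1 delivers the peak
      have hj1 : ((j : Int) + 1) = (a - 1) / 2 := by omega
      have h1 : 1 ≤ j + 1 := by omega
      have h2 : ((j + 1 : Nat) : Int) ≤ (a - 1) / 2 := by push_cast; omega
      rw [phase1 a ha (j + 1) h1 h2]
      have hc : ((j + 1 : Nat) : Int) = (a - 1) / 2 := by push_cast; omega
      constructor
      · rw [hc]
      · have hb : 2 * ((a - 1) / 2) ≤ a - 1 := by omega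
        have hlt2 : a * 2 * ((a - 1) / 2) < a ^ 2 := by nlinarith
        have h0 : 0 ≤ a * 2 * ((a - 1) / 2) := by
          have : 0 ≤ (a - 1) / 2 := by omega
          positivity
        rw [hc, Int.emod_eq_of_lt h0 hlt2]
    · obtain ⟨ihm, ihs⟩ := ih hge
      rw [Function.iterate_succ_apply']
      have hs' : (((gstep a)^[j] (2, 0)).2 + a * 2) % a ^ 2 =
          (a * 2 * ((j : Int) + 1)) % a ^ 2 := by
        rw [ihs, Int.add_emod (a * 2 * (j : Int) % a ^ 2),
          Int.emod_emod_of_dvd _ dvd_rfl, ← Int.add_emod]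
        ring_nf
      constructor
      · simp only [gstep, hs', ihm]
        exact max_eq_left (s_bound a ha ((j : Int) + 1))
      · simp only [gstep, hs']
        norm_cast
theorem fa_eq_alt (a : Int) : fa a = fa_alt a := by
  rcases le_or_gt a 0 with h0 | h1
  · -- empty loop
    have : PySem.List.pyRange 1 (2 * a + 1) 2 = [] := by
      rw [PySem.List.pyRange_of_pos 1 (2 * a + 1) (by norm_num), if_neg (by omega)]
      simp
    simp [fa, this, fa_alt, if_pos (by omega : a ≤ 2)]
  · rcases lt_or_ge a 3 with hsm | h3
    · interval_cases a <;> decide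
    · rw [fa_eq_iter a (by omega)]
      have hge : (a - 1) / 2 ≤ ((a.toNat : Nat) : Int) := by omega
      rw [(phase2 a h3 a.toNat hge).1]
      have hne : ¬ a ≤ 2 := by omega
      rw [fa_alt, if_neg hne]
      have hm2 : PySem.Int.mod a 2 = a % 2 :=
        PySem.Int.mod_eq_emod_of_pos (by norm_num)
      rcases Int.even_or_odd a with ⟨b, hb⟩ | ⟨b, hb⟩
      · have hmod : PySem.Int.mod a 2 = 0 := by rw [hm2]; omega
        rw [if_neg (fun h => h hmod)]
        have hB : (a - 1) / 2 = b - 1 := by omega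
        rw [hB]
        have : a - 2 = 2 * (b - 1) := by omega
        rw [this]; ring
      · have hmod : PySem.Int.mod a 2 ≠ 0 := by rw [hm2]; omega
        rw [if_pos hmod]
        have hB : (a - 1) / 2 = b := by omega
        rw [hB]
        have : a - 1 = 2 * b := by omega
        rw [this]; ring

-- ===== VERDICT (by name: the statement is the Claim_ definition above) =====
theorem fa_spec : Claim_equal_fa := by
  intro a _
  unfold Spec_fa
  exact fa_eq_alt a
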